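-- pv_equiv track=rewrite | github.com/eliottcassidy2000/math | 04-computation/a000568_speedup.py | a000568_dirichlet
-- ===== SOURCE A (Python) =====
-- from math import gcd, factorial, isqrt
-- from collections import Counter
--
-- def euler_totient(n):
--     """Euler's totient function φ(n)."""
--     result = n
--     p = 2
--     temp = n
--     while p * p <= temp:
--         if temp % p == 0:
--             while temp % p == 0:
--                 temp //= p
--             result -= result // p
--         p += 1
--     if temp > 1:
--         result -= result // temp
--     return result
--
-- def partitions_odd_parts(n):
--     """Generate all partitions of n into odd parts (= all partitions of n by Euler)."""
--     # We generate partitions of n into odd parts directly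
--     def _gen(remaining, max_part):
--         if remaining == 0:
--             yield []
--             return
--         # max_part must be odd
--         if max_part % 2 == 0:
--             max_part -= 1
--         for k in range(min(remaining, max_part), 0, -2):  # odd parts only
--             for rest in _gen(remaining - k, k):
--                 yield [k] + rest
--     yield from _gen(n, n if n % 2 == 1 else n - 1)
--
-- def a000568_dirichlet(n):
--     """Davis formula with Dirichlet-accelerated gcd quadratic form.
--
--     Uses: gcd(r,s) = Σ_{d|gcd(r,s)} φ(d)
--     So: Σ_{r,s} m_r m_s gcd(r,s) = Σ_d φ(d) (Σ_{d|r} m_r)²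
--
--     For each partition, this replaces O(k²) gcd calls with O(n) divisor sums.
--     """
--     if n <= 1:
--         return 1
--
--     # Precompute Euler totients
--     phi = [0] * (n + 1)
--     for i in range(1, n + 1):
--         phi[i] = euler_totient(i)
--
--     total = 0
--     for partition in partitions_odd_parts(n):
--         mults = Counter(partition)
--         parts = sorted(mults.keys())
--
--         # Compute S_d = Σ_{d|r} m_r for each d
--         S = {}
--         for d in range(1, n + 1):
--             sd = sum(mults.get(r, 0) for r in range(d, n + 1, d) if r % 2 == 1)
--             if sd > 0:
--                 S[d] = sd
--
--         # Compute Σ_{r,s} m_r m_s gcd(r,s) = Σ_d φ(d) S_d²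
--         gcd_sum = sum(phi[d] * S[d]**2 for d, sd in S.items() if d in S)
--
--         total_m = sum(mults.values())
--         t = (gcd_sum - total_m) // 2
--
--         z = 1
--         for k, m in mults.items():
--             z *= k**m * factorial(m)
--
--         total += (1 << t) * factorial(n) // z
--
--     return total // factorial(n)
-- ===== SOURCE B (Python) =====
-- from math import gcd, factorial
--
--
-- def _odd_partitions(remaining, max_part):
--     """All partitions of `remaining` into odd parts <= max_part (largest part first)."""
--     if remaining == 0:
--         return [[]]
--     if max_part % 2 == 0:
--         max_part -= 1
--     out = []
--     for k in range(min(remaining, max_part), 0, -2):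
--         for rest in _odd_partitions(remaining - k, k):
--             out.append([k] + rest)
--     return out
--
--
-- def a000568_dirichlet(n):
--     """Davis formula; the gcd quadratic form is computed directly as a double
--     loop over the distinct parts with math.gcd (no totient table, no divisor sums)."""
--     if n <= 1:
--         return 1
--
--     total = 0
--     for partition in _odd_partitions(n, n if n % 2 == 1 else n - 1):
--         mults = {}
--         for k in partition:
--             mults[k] = mults.get(k, 0) + 1
--
--         gcd_sum = 0
--         for r, mr in mults.items():
--             if r % 2 == 1:
--                 for s, ms in mults.items():
--                     if s % 2 == 1:
--                         gcd_sum += mr * ms * gcd(r, s)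
--
--         total_m = sum(mults.values())
--         t = (gcd_sum - total_m) // 2
--
--         z = 1
--         for k, m in mults.items():
--             z *= k ** m * factorial(m)
--
--         total += (1 << t) * factorial(n) // z
--
--     return total // factorial(n)
-- ===== Notes on version B (the rewrite author's own statement) =====
-- stated objective: alternative
-- what changed: B drops A's Euler-totient table and the per-partition divisor-sum dictionary S (the Dirichlet identity gcd(r,s)=sum of phi(d) over d | gcd) and computes the gcd quadratic form directly as a double loop over the distinct odd parts with math.gcd; partition enumeration and the Davis tail formula are unchanged.
import Mathlib
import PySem

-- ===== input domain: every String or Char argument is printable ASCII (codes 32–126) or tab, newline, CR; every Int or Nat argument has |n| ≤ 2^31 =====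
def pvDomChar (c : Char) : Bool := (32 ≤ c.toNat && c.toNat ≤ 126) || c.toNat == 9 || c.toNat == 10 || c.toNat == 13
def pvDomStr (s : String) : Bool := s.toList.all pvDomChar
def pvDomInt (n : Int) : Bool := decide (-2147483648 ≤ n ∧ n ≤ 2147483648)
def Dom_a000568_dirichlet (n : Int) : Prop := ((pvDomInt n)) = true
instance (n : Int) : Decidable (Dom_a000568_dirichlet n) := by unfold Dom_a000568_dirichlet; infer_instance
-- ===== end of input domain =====

-- B replaces A's totient-table + divisor-sum (Dirichlet) evaluation of the gcd quadratic form by a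
-- direct double loop over the distinct odd parts with gcd; same value everywhere (alternative algorithm).

-- ===== SHARED HELPERS (code both Pythons contain verbatim) =====

-- factorial(m) for the nonnegative arguments it is applied to
def pyFactorial (m : Int) : Int := (Nat.factorial m.toNat : Int)

-- the recursive generator _gen of partitions into odd parts (both sources share it verbatim);
-- `attach` only carries the membership fact needed for termination
def genParts (remaining maxPart : Int) : List (List Int) :=
  if remaining = 0 then [[]]
  else
    let mp := if PySem.Int.mod maxPart 2 = 0 then maxPart - 1 else maxPart
    (PySem.List.pyRange (min remaining mp) 0 (-2)).attach.foldl
      (fun out kh => out ++ (genParts (remaining - kh.1) kh.1).map (fun rest => kh.1 :: rest)) []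
termination_by remaining.toNat
decreasing_by
  have hk := kh.2
  simp only [PySem.List.pyRange] at hk
  norm_num at hk
  obtain ⟨k, hk1, hk2⟩ := hk
  split_ifs at hk1 <;> omega

-- the loop tail both sources share verbatim: total_m, t, z and the accumulation into total
def pvFinish (n total : Int) (mults : PySem.Dict Int Int) (gcd_sum : Int) : Int :=
  let total_m := mults.values.sum
  let t := PySem.Int.floordiv (gcd_sum - total_m) 2
  let z := mults.items.foldl (fun z km => z * km.1 ^ km.2.toNat * pyFactorial km.2) 1
  total + PySem.Int.floordiv ((1 <<< t.toNat) * pyFactorial n) z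

-- ===== PORT A =====

-- the two while loops of euler_totient, run on ℕ (every call site has 1 ≤ i, where Python's
-- // and % on nonnegative ints are exactly ℕ division; the `2 ≤ p`/`0 < temp` conjuncts only
-- make the recursion total — they hold at every reachable call)
def etStrip (p temp : Nat) : Nat :=
  if h : 2 ≤ p ∧ 0 < temp ∧ temp % p = 0 then etStrip p (temp / p) else temp
termination_by temp
decreasing_by exact Nat.div_lt_self h.2.1 (by omega)

lemma etStrip_le (p temp : Nat) : etStrip p temp ≤ temp := by
  fun_induction etStrip with
  | case1 temp h ih => exact le_trans ih (Nat.div_le_self _ _)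
  | case2 temp h => exact le_refl _

def etLoop (p temp result : Nat) : Nat × Nat :=
  if h : 2 ≤ p ∧ p * p ≤ temp then
    if temp % p = 0 then etLoop (p + 1) (etStrip p temp) (result - result / p)
    else etLoop (p + 1) temp result
  else (temp, result)
termination_by temp + 1 - p
decreasing_by
  · have hle := etStrip_le p temp
    have h2 : p ≤ p * p := Nat.le_mul_of_pos_left p (by omega)
    omega
  · have h2 : p ≤ p * p := Nat.le_mul_of_pos_left p (by omega)
    omega

def eulerTotient (i : Int) : Int :=
  let m := i.toNat
  let tr := etLoop 2 m m
  if 1 < tr.1 then ((tr.2 - tr.2 / tr.1 : Nat) : Int) else (tr.2 : Int)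

-- sd = sum(mults.get(r, 0) for r in range(d, n+1, d) if r % 2 == 1)
def pvSd (mults : PySem.Dict Int Int) (n d : Int) : Int :=
  (((PySem.List.pyRange d (n + 1) d).filter
      (fun r => decide (PySem.Int.mod r 2 = 1))).map (fun r => mults.getD r 0)).sum

-- the S-building loop: for d in range(1, n+1): … if sd > 0: S[d] = sd
def pvS (mults : PySem.Dict Int Int) (n : Int) : PySem.Dict Int Int :=
  (PySem.List.pyRange 1 (n + 1) 1).foldl
    (fun S d => let sd := pvSd mults n d; if sd > 0 then S.insert d sd else S) PySem.Dict.empty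

-- gcd_sum = sum(phi[d] * S[d]**2 for d, sd in S.items() if d in S)
def pvGcdSumA (phi : List Int) (S : PySem.Dict Int Int) : Int :=
  ((S.items.filter (fun dv => S.contains dv.1)).map
    (fun dv => PySem.List.pyGetD phi dv.1 0 * (S.getD dv.1 0) ^ 2)).sum

-- loop body of A's main loop (phi is the precomputed totient table)
def stepA (n : Int) (phi : List Int) (total : Int) (partition : List Int) : Int :=
  let mults := PySem.Dict.counter partition
  let _parts := PySem.List.sorted mults.keys (fun x => x) false  -- dead in A too
  let S := pvS mults n
  pvFinish n total mults (pvGcdSumA phi S)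

def a000568_dirichlet (n : Int) : Int :=
  if n ≤ 1 then 1
  else
    let phi : List Int := 0 :: (PySem.List.pyRange 1 (n + 1) 1).map (fun i => eulerTotient i)
    let total := (genParts n (if PySem.Int.mod n 2 = 1 then n else n - 1)).foldl
      (fun total partition => stepA n phi total partition) 0
    PySem.Int.floordiv total (pyFactorial n)

-- ===== PORT B =====

-- gcd_sum: direct double loop over the items, restricted to odd parts
def pvGcdSumB (mults : PySem.Dict Int Int) : Int :=
  mults.items.foldl
    (fun acc rm =>
      if PySem.Int.mod rm.1 2 = 1 then
        mults.items.foldl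
          (fun acc2 sm =>
            if PySem.Int.mod sm.1 2 = 1 then acc2 + rm.2 * sm.2 * (Int.gcd rm.1 sm.1 : Int)
            else acc2) acc
      else acc) 0

-- loop body of B's main loop (mults built by an explicit dict loop)
def stepB (n total : Int) (partition : List Int) : Int :=
  let mults := partition.foldl (fun d k => d.insert k (d.getD k 0 + 1)) PySem.Dict.empty
  pvFinish n total mults (pvGcdSumB mults)

def a000568_dirichlet_alt (n : Int) : Int :=
  if n ≤ 1 then 1
  else
    let total := (genParts n (if PySem.Int.mod n 2 = 1 then n else n - 1)).foldl
      (fun total partition => stepB n total partition) 0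
    PySem.Int.floordiv total (pyFactorial n)

-- ===== PRECONDITION & SPEC =====
def Spec_a000568_dirichlet (n : Int) (out : Int) : Prop := out = a000568_dirichlet_alt n
instance (n : Int) (out : Int) : Decidable (Spec_a000568_dirichlet n out) := by unfold Spec_a000568_dirichlet; infer_instance

-- ===== CLAIM (what is proved, stated in full; the proofs are below) =====
def Claim_equal_a000568_dirichlet : Prop := ∀ (n : Int), Dom_a000568_dirichlet n → Spec_a000568_dirichlet n (a000568_dirichlet n)

-- ===== LEMMAS AND PROOFS =====

lemma etStrip_spec (p temp : Nat) : 2 ≤ p → 0 < temp →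
    ∃ v, temp = p ^ v * etStrip p temp ∧ ¬ p ∣ etStrip p temp ∧ 0 < etStrip p temp := by
  fun_induction etStrip p temp with
  | case1 temp h ih =>
    intro hp ht
    have hd : p ∣ temp := Nat.dvd_of_mod_eq_zero h.2.2
    obtain ⟨v, hv, hnd, hpos⟩ := ih hp (Nat.div_pos (Nat.le_of_dvd ht hd) (by omega))
    refine ⟨v + 1, ?_, hnd, hpos⟩
    calc temp = temp / p * p := (Nat.div_mul_cancel hd).symm
    _ = p ^ v * etStrip p (temp / p) * p := by rw [← hv]
    _ = p ^ (v + 1) * etStrip p (temp / p) := by ring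
  | case2 temp h =>
    intro hp ht
    exact ⟨0, by ring, fun hd => h ⟨hp, ht, Nat.dvd_iff_mod_eq_zero.mp hd⟩, ht⟩

lemma prime_of_no_small (p temp : Nat) (h1 : 1 < temp)
    (hs : ∀ q, q.Prime → q ∣ temp → p ≤ q) (hlt : temp < p * p) : temp.Prime := by
  by_contra hnp
  have hqp : temp.minFac.Prime := Nat.minFac_prime (by omega)
  have hqd : temp.minFac ∣ temp := Nat.minFac_dvd temp
  have hm : temp = temp.minFac * (temp / temp.minFac) := (Nat.mul_div_cancel' hqd).symm
  have hmpos : 0 < temp / temp.minFac := Nat.div_pos (Nat.minFac_le (by omega)) hqp.pos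
  have hm1 : 1 < temp / temp.minFac := by
    rcases Nat.lt_or_ge 1 (temp / temp.minFac) with h | h
    · exact h
    · exfalso; apply hnp
      have : temp / temp.minFac = 1 := by omega
      rw [this, mul_one] at hm
      rw [hm]; exact hqp
  have hq'p : (temp / temp.minFac).minFac.Prime := Nat.minFac_prime (by omega)
  have hq'd : (temp / temp.minFac).minFac ∣ temp :=
    dvd_trans (Nat.minFac_dvd _) (Nat.div_dvd_of_dvd hqd)
  have h1' : p ≤ temp.minFac := hs _ hqp hqd
  have h2' : p ≤ (temp / temp.minFac).minFac := hs _ hq'p hq'd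
  have h3' : (temp / temp.minFac).minFac ≤ temp / temp.minFac := Nat.minFac_le hmpos
  have : p * p ≤ temp := by
    calc p * p ≤ temp.minFac * (temp / temp.minFac) :=
      Nat.mul_le_mul h1' (le_trans h2' h3')
    _ = temp := hm.symm
  omega

lemma etExit (p temp a : Nat) (ht : 0 < temp) (hlt : temp < p * p)
    (hs : ∀ q, q.Prime → q ∣ temp → p ≤ q) (hc : Nat.Coprime a temp) :
    (if 1 < temp then a.totient * temp - a.totient * temp / temp else a.totient * temp)
      = (a * temp).totient := by
  by_cases h1 : 1 < temp
  · rw [if_pos h1]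
    have hpr := prime_of_no_small p temp h1 hs hlt
    rw [Nat.mul_div_cancel _ ht, Nat.totient_mul hc, Nat.totient_prime hpr]
    have := Nat.mul_sub a.totient temp 1
    omega
  · rw [if_neg h1]
    have : temp = 1 := by omega
    subst this
    simp [Nat.totient_one]

lemma etLoop_totient (fuel : Nat) : ∀ (p temp a : Nat), temp + 1 - p ≤ fuel → 2 ≤ p → 0 < temp →
    (∀ q, q.Prime → q ∣ temp → p ≤ q) → Nat.Coprime a temp →
    (if 1 < (etLoop p temp (a.totient * temp)).1
      then (etLoop p temp (a.totient * temp)).2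
        - (etLoop p temp (a.totient * temp)).2 / (etLoop p temp (a.totient * temp)).1
      else (etLoop p temp (a.totient * temp)).2) = (a * temp).totient := by
  induction fuel with
  | zero =>
    intro p temp a hf hp ht hs hc
    have hlt : temp < p * p :=
      lt_of_lt_of_le (by omega : temp < p) (Nat.le_mul_of_pos_left p (by omega))
    rw [etLoop, dif_neg (by push_neg; intro _; omega)]
    exact etExit p temp a ht hlt hs hc
  | succ fuel ih =>
    intro p temp a hf hp ht hs hc
    by_cases hg : p * p ≤ temp
    · have hple : p ≤ temp := le_trans (Nat.le_mul_of_pos_left p (by omega)) hg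
      rw [etLoop, dif_pos ⟨hp, hg⟩]
      by_cases hmod : temp % p = 0
      · rw [if_pos hmod]
        have hpd : p ∣ temp := Nat.dvd_of_mod_eq_zero hmod
        -- p is prime here
        have hpprime : p.Prime := by
          have h1 := Nat.minFac_prime (show p ≠ 1 by omega)
          have h2 : p.minFac ∣ temp := dvd_trans (Nat.minFac_dvd p) hpd
          have h3 := hs _ h1 h2
          have h4 := Nat.minFac_le (show 0 < p by omega)
          have : p.minFac = p := by omega
          rw [← this]; exact h1
        obtain ⟨v, hv, hnd, hupos⟩ := etStrip_spec p temp hp ht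
        set u := etStrip p temp with hu
        have hvpos : 0 < v := by
          rcases Nat.eq_zero_or_pos v with h0 | h
          · exfalso; rw [h0, pow_zero, one_mul] at hv; exact hnd (hv ▸ hpd)
          · exact h
        have hud : u ∣ temp := ⟨p ^ v, by rw [hv]; ring⟩
        have hcpu : Nat.Coprime (p ^ v) u := (Nat.Prime.coprime_iff_not_dvd hpprime).mpr hnd |>.pow_left v
        have hcau : Nat.Coprime a u := hc.coprime_dvd_right hud
        have hcapv : Nat.Coprime a (p ^ v) := hc.coprime_dvd_right ⟨u, hv⟩
        have harg : a.totient * temp - a.totient * temp / p = (a * p ^ v).totient * u := by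
          have hvv : p ^ v = p * p ^ (v - 1) := by
            conv_lhs => rw [show v = (v - 1) + 1 by omega]
            rw [pow_succ']
          have hsplit : temp = p * (p ^ (v - 1) * u) := by rw [hv, hvv]; ring
          have hdiv : a.totient * temp / p = a.totient * (p ^ (v - 1) * u) := by
            rw [hsplit,
              show a.totient * (p * (p ^ (v - 1) * u)) = a.totient * (p ^ (v - 1) * u) * p by ring]
            exact Nat.mul_div_cancel _ (by omega)
          rw [hdiv, Nat.totient_mul hcapv, Nat.totient_prime_pow hpprime hvpos, hsplit]
          have h5 : a.totient * (p ^ (v - 1) * (p - 1)) * u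
              = (a.totient * (p ^ (v - 1) * u)) * (p - 1) := by ring
          rw [h5, Nat.mul_sub]
          have e1 : a.totient * (p * (p ^ (v - 1) * u)) = (a.totient * (p ^ (v - 1) * u)) * p := by
            ring
          have e2 : a.totient * (p ^ (v - 1) * u) = (a.totient * (p ^ (v - 1) * u)) * 1 := by ring
          omega
        rw [harg]
        have hs' : ∀ q, q.Prime → q ∣ u → p + 1 ≤ q := by
          intro q hq hqd
          have h1 := hs q hq (dvd_trans hqd hud)
          rcases Nat.eq_or_lt_of_le h1 with h | h
          · exfalso; exact hnd (h ▸ hqd)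
          · omega
        have := ih (p + 1) u (a * p ^ v) (by have := etStrip_le p temp; omega) (by omega) hupos hs'
          (Nat.Coprime.mul_left hcau hcpu)
        rw [this, mul_assoc, ← hv]
      · rw [if_neg hmod]
        have hs' : ∀ q, q.Prime → q ∣ temp → p + 1 ≤ q := by
          intro q hq hqd
          have h1 := hs q hq hqd
          rcases Nat.eq_or_lt_of_le h1 with h | h
          · exfalso; exact hmod (h ▸ Nat.dvd_iff_mod_eq_zero.mp hqd)
          · omega
        exact ih (p + 1) temp a (by omega) (by omega) ht hs' hc
    · rw [etLoop, dif_neg (by push_neg; intro _; omega)]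
      exact etExit p temp a ht (by omega) hs hc

lemma eulerTotient_eq (i : Int) (hi : 1 ≤ i) : eulerTotient i = (Nat.totient i.toNat : Int) := by
  have hm : 0 < i.toNat := by omega
  have h := etLoop_totient (i.toNat + 1) 2 i.toNat 1 (by omega) (by omega) hm
    (fun q hq _ => hq.two_le) (Nat.coprime_one_left _)
  rw [Nat.totient_one, one_mul] at h
  unfold eulerTotient
  simp only []
  split
  · rename_i hlt
    rw [if_pos hlt] at h
    exact_mod_cast h
  · rename_i hlt
    rw [if_neg hlt] at h
    exact_mod_cast h

-- ---------- notation-level abbreviations used only by the proofs ----------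

def pvCnt (p : List Int) (r : Int) : Int := (p.count r : Int)

def pvFodd (n : Int) : Finset Int :=
  ((PySem.List.pyRange 1 (n + 1) 1).toFinset).filter (fun r => r % 2 = 1)

lemma pvFodd_eq (n : Int) : pvFodd n = (Finset.Icc 1 n).filter (fun r => r % 2 = 1) := by
  unfold pvFodd
  congr 1
  ext x
  simp only [List.mem_toFinset, PySem.List.mem_pyRange_one, Finset.mem_Icc]
  omega

def pvMsum (p : List Int) (n d : Int) : Int := ((pvFodd n).filter (fun r => d ∣ r)).sum (pvCnt p)

-- ---------- generator invariant ----------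

lemma mem_pyRange_neg_two {s x : Int} (hx : x ∈ PySem.List.pyRange s 0 (-2)) : 0 < x ∧ x ≤ s := by
  simp only [PySem.List.pyRange] at hx
  norm_num at hx
  obtain ⟨k, hk1, hk2⟩ := hx
  split_ifs at hk1 <;> omega

lemma genParts_bounds : ∀ (RN : Nat) (R mp : Int), R.toNat ≤ RN → 0 ≤ R →
    ∀ q ∈ genParts R mp, ∀ k ∈ q, 1 ≤ k ∧ k ≤ R := by
  intro RN
  induction RN with
  | zero =>
    intro R mp hRN hR q hq k hk
    have hR0 : R = 0 := by omega
    subst hR0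
    rw [genParts, if_pos rfl] at hq
    simp only [List.mem_singleton] at hq
    subst hq
    simp at hk
  | succ RN ih =>
    intro R mp hRN hR q hq k hk
    by_cases hR0 : R = 0
    · subst hR0
      rw [genParts, if_pos rfl] at hq
      simp only [List.mem_singleton] at hq
      subst hq
      simp at hk
    · rw [genParts, if_neg hR0] at hq
      dsimp only at hq
      rw [PySem.List.foldl_append_eq_flatMap] at hq
      simp only [List.nil_append, List.mem_flatMap] at hq
      obtain ⟨kh, _, hq⟩ := hq
      rw [List.mem_map] at hq
      obtain ⟨rest, hrest, rfl⟩ := hq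
      have hb := mem_pyRange_neg_two kh.2
      have hbR : kh.1 ≤ R := le_trans hb.2 (min_le_left _ _)
      rcases List.mem_cons.mp hk with rfl | hk'
      · exact ⟨hb.1, hbR⟩
      · have := ih (R - kh.1) kh.1 (by omega) (by omega) rest hrest k hk'
        omega

-- ---------- A-side reshaping ----------

lemma items_foldl_insert_if (val : Int → Int) :
    ∀ (ds : List Int) (S0 : PySem.Dict Int Int), ds.Nodup → (∀ d ∈ ds, S0.contains d = false) →
    (ds.foldl (fun S d => if val d > 0 then S.insert d (val d) else S) S0).items
      = S0.items ++ (ds.filter (fun d => decide (val d > 0))).map (fun d => (d, val d)) := by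
  intro ds
  induction ds with
  | nil => intro S0 _ _; simp
  | cons d ds ih =>
    intro S0 hnd hfresh
    simp only [List.foldl_cons, List.filter_cons]
    by_cases hv : val d > 0
    · rw [if_pos hv]
      rw [ih (S0.insert d (val d)) hnd.of_cons ?_]
      · rw [PySem.Dict.items_insert_of_not_contains _ _ (hfresh d List.mem_cons_self)]
        simp [hv]
      · intro e he
        rw [PySem.Dict.contains_insert]
        have hne : e ≠ d := by
          intro h
          subst h
          exact (List.nodup_cons.mp hnd).1 he
        simp [hne, hfresh e (List.mem_cons_of_mem _ he)]
    · rw [if_neg hv]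
      rw [ih S0 hnd.of_cons (fun e he => hfresh e (List.mem_cons_of_mem _ he))]
      simp [hv]

lemma pvS_items (mults : PySem.Dict Int Int) (n : Int) :
    (pvS mults n).items
      = ((PySem.List.pyRange 1 (n + 1) 1).filter
          (fun d => decide (pvSd mults n d > 0))).map (fun d => (d, pvSd mults n d)) := by
  have hrfl : pvS mults n = (PySem.List.pyRange 1 (n + 1) 1).foldl
      (fun S d => if pvSd mults n d > 0 then S.insert d (pvSd mults n d) else S)
      PySem.Dict.empty := rfl
  rw [hrfl, items_foldl_insert_if (pvSd mults n) _ _ (PySem.List.nodup_pyRange_one 1 (n + 1))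
    (fun d _ => PySem.Dict.contains_empty d)]
  simp [PySem.Dict.empty]

lemma pvGcdSumA_eq_list (phi : List Int) (mults : PySem.Dict Int Int) (n : Int) :
    pvGcdSumA phi (pvS mults n)
      = (((PySem.List.pyRange 1 (n + 1) 1).filter
          (fun d => decide (pvSd mults n d > 0))).map
            (fun d => PySem.List.pyGetD phi d 0 * (pvSd mults n d) ^ 2)).sum := by
  have hitems := pvS_items mults n
  unfold pvGcdSumA
  have hnodL : ((PySem.List.pyRange 1 (n + 1) 1).filter
      (fun d => decide (pvSd mults n d > 0))).Nodup :=
    List.Nodup.filter _ (PySem.List.nodup_pyRange_one 1 (n + 1))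
  have hkeys : (pvS mults n).keys = (PySem.List.pyRange 1 (n + 1) 1).filter
      (fun d => decide (pvSd mults n d > 0)) := by
    simp only [PySem.Dict.keys, hitems, List.map_map]
    have hid : ((fun x : Int × Int => x.1) ∘ fun d : Int => (d, pvSd mults n d)) = id := rfl
    rw [hid, List.map_id]
  rw [hitems, List.filter_eq_self.mpr ?keep]
  case keep =>
    intro dv hdv
    obtain ⟨d, hd, rfl⟩ := List.mem_map.mp hdv
    rw [PySem.Dict.contains_eq_decide_mem_keys, hkeys]
    simpa using hd
  rw [List.map_map]
  apply congrArg List.sum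
  apply List.map_congr_left
  intro d hd
  simp only [Function.comp]
  congr 1
  have hg : (pvS mults n).getD d 0 = pvSd mults n d := by
    apply PySem.Dict.getD_of_mem_items
    · rw [hitems]; exact List.mem_map_of_mem hd
    · rw [hkeys]; exact hnodL
  rw [hg]

lemma phi_lookup (n d : Int) (h1 : 1 ≤ d) (h2 : d ≤ n) :
    PySem.List.pyGetD (0 :: (PySem.List.pyRange 1 (n + 1) 1).map (fun i => eulerTotient i)) d 0
      = (Nat.totient d.toNat : Int) := by
  have hlen : ((PySem.List.pyRange 1 (n + 1) 1).map (fun i => eulerTotient i)).length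
      = n.toNat := by
    rw [List.length_map, PySem.List.length_pyRange_one]
    omega
  rw [PySem.List.pyGetD_eq_getElem _ _ (by omega)
    (by simp only [List.length_cons, hlen]; omega)]
  have hdt : d.toNat = (d.toNat - 1) + 1 := by omega
  rw [List.getElem_cons]
  rw [dif_neg (by omega)]
  rw [List.getElem_map, PySem.List.getElem_pyRange_one]
  have he : (1 + ((d.toNat - 1 : Nat) : Int)) = d := by omega
  rw [he, eulerTotient_eq d (by omega)]

lemma pvSd_nonneg (p : List Int) (n d : Int) : 0 ≤ pvSd (PySem.Dict.counter p) n d := by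
  unfold pvSd
  apply List.sum_nonneg
  intro x hx
  obtain ⟨r, _, rfl⟩ := List.mem_map.mp hx
  rw [PySem.Dict.getD_counter]
  exact Int.natCast_nonneg _

lemma pvSd_eq_msum (p : List Int) (n d : Int) (hd : 1 ≤ d) :
    pvSd (PySem.Dict.counter p) n d = pvMsum p n d := by
  have hdpos : (0 : Int) < d := by omega
  have hnodR : (PySem.List.pyRange d (n + 1) d).Nodup := by
    rw [PySem.List.pyRange_of_pos _ _ hdpos]
    refine List.Nodup.map ?_ List.nodup_range
    intro x y h
    have h2 : (d : Int) * x = d * y := by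
      have := add_left_cancel h
      exact this
    have h3 : (x : Int) = y := mul_left_cancel₀ (by omega) h2
    exact_mod_cast h3
  have hnodM : ((PySem.List.pyRange d (n + 1) d).filter
      (fun r => decide (PySem.Int.mod r 2 = 1))).Nodup := List.Nodup.filter _ hnodR
  unfold pvSd pvMsum
  have hfun : (fun r => (PySem.Dict.counter p).getD r 0) = pvCnt p := by
    funext r
    rw [PySem.Dict.getD_counter]
    rfl
  have hmod2 : ∀ r : Int, PySem.Int.mod r 2 = r % 2 := fun r =>
    PySem.Int.mod_eq_emod_of_pos (by omega)
  rw [hfun, ← List.sum_toFinset _ hnodM]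
  congr 1
  rw [pvFodd_eq]
  ext r
  simp only [List.mem_toFinset, List.mem_filter, Finset.mem_filter, Finset.mem_Icc,
    PySem.List.mem_pyRange_iff_of_pos hdpos, decide_eq_true_eq, hmod2]
  constructor
  · rintro ⟨⟨hdr, hrn, hdvd⟩, hodd⟩
    have hr : d ∣ r := by
      have := dvd_add hdvd (dvd_refl d)
      simpa using this
    exact ⟨⟨⟨by omega, by omega⟩, hodd⟩, hr⟩
  · rintro ⟨⟨⟨h1r, hrn⟩, hodd⟩, hdvd⟩
    have hdr : d ≤ r := Int.le_of_dvd (by omega) hdvd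
    exact ⟨⟨hdr, by omega, dvd_sub hdvd (dvd_refl d)⟩, hodd⟩

lemma pyRange_toFinset (n : Int) :
    (PySem.List.pyRange 1 (n + 1) 1).toFinset = Finset.Icc 1 n := by
  ext x
  simp only [List.mem_toFinset, PySem.List.mem_pyRange_one, Finset.mem_Icc]
  omega

lemma gcdSumA_eq (p : List Int) (n : Int) :
    pvGcdSumA (0 :: (PySem.List.pyRange 1 (n + 1) 1).map (fun i => eulerTotient i))
        (pvS (PySem.Dict.counter p) n)
      = (Finset.Icc 1 n).sum (fun d => (Nat.totient d.toNat : Int) * (pvMsum p n d) ^ 2) := by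
  rw [pvGcdSumA_eq_list]
  rw [← List.sum_toFinset _ (List.Nodup.filter _ (PySem.List.nodup_pyRange_one 1 (n + 1)))]
  rw [List.toFinset_filter, pyRange_toFinset]
  rw [Finset.sum_filter]
  apply Finset.sum_congr rfl
  intro d hd
  rw [Finset.mem_Icc] at hd
  rw [phi_lookup n d hd.1 hd.2, pvSd_eq_msum p n d hd.1]
  split_ifs with h
  · rfl
  · have hge := pvSd_nonneg p n d
    rw [pvSd_eq_msum p n d hd.1] at hge
    simp only [decide_eq_true_eq] at h
    have hz : pvMsum p n d = 0 := by omega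
    rw [hz]
    ring

-- ---------- B-side reshaping ----------

lemma gcdSumB_eq (p : List Int) (n : Int) (hp : ∀ k ∈ p, 1 ≤ k ∧ k ≤ n) :
    pvGcdSumB (PySem.Dict.counter p)
      = (pvFodd n).sum (fun r => (pvFodd n).sum
          (fun s => pvCnt p r * pvCnt p s * (Int.gcd r s : Int))) := by
  have hmod2 : ∀ r : Int, PySem.Int.mod r 2 = r % 2 := fun r =>
    PySem.Int.mod_eq_emod_of_pos (by omega)
  unfold pvGcdSumB
  rw [PySem.Dict.items_counter]
  have hcomp : ((fun sm : Int × Int => decide (PySem.Int.mod sm.1 2 = 1))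
      ∘ (fun k : Int => (k, (List.count k p : Int)))) = fun k => decide (PySem.Int.mod k 2 = 1) :=
    rfl
  have hKFnodup : ((PySem.Set.ofList p).filter
      (fun k => decide (PySem.Int.mod k 2 = 1))).Nodup :=
    List.Nodup.filter _ (PySem.Set.nodup_ofList p)
  have hinner : ∀ (acc : Int) (rm : Int × Int),
      List.foldl (fun acc2 sm => if PySem.Int.mod sm.1 2 = 1 then
          acc2 + rm.2 * sm.2 * (Int.gcd rm.1 sm.1 : Int) else acc2) acc
        ((PySem.Set.ofList p).map (fun k => (k, (List.count k p : Int))))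
      = acc + (((PySem.Set.ofList p).filter (fun k => decide (PySem.Int.mod k 2 = 1))).map
          (fun s => rm.2 * (List.count s p : Int) * (Int.gcd rm.1 s : Int))).sum := by
    intro acc rm
    rw [PySem.List.foldl_ite_eq_foldl_filter, List.filter_map, hcomp, List.foldl_map,
      PySem.List.foldl_add]
  rw [PySem.List.foldl_congr_mem _ _
    (fun acc rm => if PySem.Int.mod rm.1 2 = 1 then
      acc + (((PySem.Set.ofList p).filter (fun k => decide (PySem.Int.mod k 2 = 1))).map
        (fun s => rm.2 * (List.count s p : Int) * (Int.gcd rm.1 s : Int))).sum else acc) 0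
    (by
      intro acc x _
      dsimp only
      split_ifs
      · exact hinner acc x
      · rfl)]
  rw [PySem.List.foldl_ite_eq_foldl_filter, List.filter_map, hcomp, List.foldl_map,
    PySem.List.foldl_add, zero_add]
  -- both sums are now over the odd distinct parts; lift to Finsets and extend to pvFodd n
  have hsubF : ((PySem.Set.ofList p).filter
      (fun k => decide (PySem.Int.mod k 2 = 1))).toFinset ⊆ pvFodd n := by
    intro x hx
    rw [List.mem_toFinset, List.mem_filter] at hx
    have hxp : x ∈ p := (PySem.Set.mem_ofList p x).mp hx.1
    have hb := hp x hxp
    have hodd := hx.2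
    simp only [decide_eq_true_eq, hmod2] at hodd
    rw [pvFodd_eq, Finset.mem_filter, Finset.mem_Icc]
    exact ⟨⟨hb.1, hb.2⟩, hodd⟩
  have hcnt0 : ∀ r ∈ pvFodd n, r ∉ ((PySem.Set.ofList p).filter
      (fun k => decide (PySem.Int.mod k 2 = 1))).toFinset → pvCnt p r = 0 := by
    intro r hF hnot
    by_cases hrp : r ∈ p
    · exfalso
      apply hnot
      rw [List.mem_toFinset, List.mem_filter]
      refine ⟨(PySem.Set.mem_ofList p r).mpr hrp, ?_⟩
      rw [pvFodd_eq, Finset.mem_filter] at hF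
      simp only [decide_eq_true_eq, hmod2]
      exact hF.2
    · unfold pvCnt
      rw [List.count_eq_zero.mpr hrp]
      rfl
  have hinnerF : ∀ r : Int,
      (((PySem.Set.ofList p).filter (fun k => decide (PySem.Int.mod k 2 = 1))).map
        (fun s => pvCnt p r * (List.count s p : Int) * (Int.gcd r s : Int))).sum
      = (pvFodd n).sum (fun s => pvCnt p r * pvCnt p s * (Int.gcd r s : Int)) := by
    intro r
    rw [← List.sum_toFinset _ hKFnodup]
    apply Finset.sum_subset hsubF
    intro s hsF hsnot
    rw [show (pvCnt p r * (List.count s p : Int) * (Int.gcd r s : Int)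
        = pvCnt p r * pvCnt p s * (Int.gcd r s : Int)) from rfl]
    rw [hcnt0 s hsF hsnot]
    ring
  rw [← List.sum_toFinset _ hKFnodup]
  calc ((PySem.Set.ofList p).filter (fun k => decide (PySem.Int.mod k 2 = 1))).toFinset.sum
        (fun r => (((PySem.Set.ofList p).filter (fun k => decide (PySem.Int.mod k 2 = 1))).map
          (fun s => (List.count r p : Int) * (List.count s p : Int) * (Int.gcd r s : Int))).sum)
      = ((PySem.Set.ofList p).filter (fun k => decide (PySem.Int.mod k 2 = 1))).toFinset.sum
        (fun r => (pvFodd n).sum (fun s => pvCnt p r * pvCnt p s * (Int.gcd r s : Int))) := by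
        apply Finset.sum_congr rfl
        intro r _
        exact hinnerF r
    _ = (pvFodd n).sum (fun r => (pvFodd n).sum
          (fun s => pvCnt p r * pvCnt p s * (Int.gcd r s : Int))) := by
        apply Finset.sum_subset hsubF
        intro r hrF hrnot
        apply Finset.sum_eq_zero
        intro s _
        rw [hcnt0 r hrF hrnot]
        ring

-- ---------- the Gauss/Dirichlet identity ----------

lemma sum_totient_divisors_int (n g : Int) (h1 : 1 ≤ g) (hg : g ≤ n) :
    (((Finset.Icc 1 n).filter (fun d => d ∣ g)).sum (fun d => (Nat.totient d.toNat : Int))) = g := by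
  have hsum : (((Finset.Icc 1 n).filter (fun d => d ∣ g)).sum
      (fun d => (Nat.totient d.toNat : Int))) = (((g.toNat.divisors).sum Nat.totient : Nat) : Int) := by
    rw [Nat.cast_sum]
    apply Finset.sum_nbij' (i := fun d : Int => d.toNat) (j := fun m : Nat => (m : Int))
    · intro a ha
      rw [Finset.mem_filter, Finset.mem_Icc] at ha
      rw [Nat.mem_divisors]
      constructor
      · have h1a : 1 ≤ a := ha.1.1
        have : (a.toNat : Int) ∣ (g.toNat : Int) := by
          rw [Int.toNat_of_nonneg (by omega), Int.toNat_of_nonneg (by omega)]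
          exact ha.2
        exact_mod_cast this
      · omega
    · intro m hm
      rw [Nat.mem_divisors] at hm
      rw [Finset.mem_filter, Finset.mem_Icc]
      have hm1 : 1 ≤ m := Nat.pos_of_dvd_of_pos hm.1 (by omega)
      have hmg : m ≤ g.toNat := Nat.le_of_dvd (by omega) hm.1
      refine ⟨⟨by omega, by omega⟩, ?_⟩
      have : (m : Int) ∣ (g.toNat : Int) := Int.natCast_dvd_natCast.mpr hm.1
      rwa [Int.toNat_of_nonneg (by omega)] at this
    · intro a ha
      rw [Finset.mem_filter, Finset.mem_Icc] at ha
      omega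
    · intro m _
      exact Int.toNat_natCast m
    · intro a _
      rfl
  rw [hsum, Nat.sum_totient]
  omega

lemma gauss_quadratic (n : Int) (F : Finset Int) (hF : ∀ r ∈ F, 1 ≤ r ∧ r ≤ n) (w : Int → Int) :
    (Finset.Icc 1 n).sum (fun d =>
        (Nat.totient d.toNat : Int) * ((F.filter (fun r => d ∣ r)).sum w) ^ 2)
      = F.sum (fun r => F.sum (fun s => w r * w s * (Int.gcd r s : Int))) := by
  have expand : ∀ d : Int, ((F.filter (fun r => d ∣ r)).sum w) ^ 2
      = F.sum (fun r => F.sum (fun s =>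
          (if d ∣ r then w r else 0) * (if d ∣ s then w s else 0))) := by
    intro d
    rw [Finset.sum_filter, sq, Finset.sum_mul_sum]
  simp only [expand, Finset.mul_sum]
  rw [Finset.sum_comm]
  apply Finset.sum_congr rfl
  intro r hr
  rw [Finset.sum_comm]
  apply Finset.sum_congr rfl
  intro s hs
  have hr1 := (hF r hr).1
  have hrn := (hF r hr).2
  have hgpos : 1 ≤ (Int.gcd r s : Int) := by
    have : Int.gcd r s ≠ 0 := fun h => by
      obtain ⟨h1, -⟩ := Int.gcd_eq_zero_iff.mp h
      omega
    omega
  have hgdvdr : (Int.gcd r s : Int) ∣ r := Int.gcd_dvd_left r s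
  have hgn : (Int.gcd r s : Int) ≤ n := le_trans (Int.le_of_dvd (by omega) hgdvdr) hrn
  have hite : ∀ d : Int, (Nat.totient d.toNat : Int)
        * ((if d ∣ r then w r else 0) * (if d ∣ s then w s else 0))
      = if d ∣ (Int.gcd r s : Int) then (Nat.totient d.toNat : Int) * (w r * w s) else 0 := by
    intro d
    by_cases h1 : d ∣ r <;> by_cases h2 : d ∣ s
    · rw [if_pos h1, if_pos h2, if_pos (Int.dvd_coe_gcd h1 h2)]
    · rw [if_pos h1, if_neg h2, if_neg (fun h => h2 (dvd_trans h (Int.gcd_dvd_right r s)))]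
      ring
    · rw [if_neg h1, if_pos h2, if_neg (fun h => h1 (dvd_trans h (Int.gcd_dvd_left r s)))]
      ring
    · rw [if_neg h1, if_neg h2, if_neg (fun h => h1 (dvd_trans h (Int.gcd_dvd_left r s)))]
      ring
  simp only [hite]
  rw [← Finset.sum_filter]
  rw [← Finset.sum_mul (((Finset.Icc 1 n).filter (fun d => d ∣ (Int.gcd r s : Int))))
    (fun d => (Nat.totient d.toNat : Int)) (w r * w s)]
  rw [sum_totient_divisors_int n (Int.gcd r s : Int) hgpos hgn]
  ring

-- ---------- per-partition and final assembly ----------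

lemma step_eq (n total : Int) (p : List Int) (hp : ∀ k ∈ p, 1 ≤ k ∧ k ≤ n) :
    stepA n (0 :: (PySem.List.pyRange 1 (n + 1) 1).map (fun i => eulerTotient i)) total p
      = stepB n total p := by
  unfold stepA stepB
  dsimp only
  rw [PySem.Dict.foldl_insert_getD_add_one_eq_counter]
  congr 1
  rw [gcdSumA_eq p n, gcdSumB_eq p n hp]
  have hF : ∀ r ∈ pvFodd n, 1 ≤ r ∧ r ≤ n := by
    intro r hr
    rw [pvFodd_eq, Finset.mem_filter, Finset.mem_Icc] at hr
    exact ⟨hr.1.1, hr.1.2⟩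
  have hg := gauss_quadratic n (pvFodd n) hF (pvCnt p)
  unfold pvMsum
  exact hg

-- ===== VERDICT (by name: the statement is the Claim_ definition above) =====
theorem a000568_dirichlet_spec : Claim_equal_a000568_dirichlet := by
  intro n _
  unfold Spec_a000568_dirichlet a000568_dirichlet a000568_dirichlet_alt
  by_cases hn : n ≤ 1
  · rw [if_pos hn, if_pos hn]
  · rw [if_neg hn, if_neg hn]
    dsimp only
    congr 1
    apply PySem.List.foldl_congr_mem
    intro acc q hq
    exact step_eq n acc q (fun k hk => by
      have := genParts_bounds n.toNat n (if PySem.Int.mod n 2 = 1 then n else n - 1)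
        (le_refl _) (by omega) q hq k hk
      omega)
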